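-- pv_equiv track=rewrite | github.com/bob831009/NLP | Topic_appending/HIS_handling.py | recalculate_word_level
-- ===== SOURCE A (Python) =====
-- def recalculate_word_level(doc, wordlist):
-- 	level = [0] * 7;
-- 	word_count = {};
-- 	for word in doc.strip().split(' '):
-- 		if word in wordlist:
-- 			level[wordlist[word]-1] += 1;
-- 		else:
-- 			level[6] += 1;
--
-- 		if word in word_count:
-- 			word_count[word] += 1;
-- 		else:
-- 			word_count[word] = 1;
--
-- 	return level, word_count;
-- ===== SOURCE B (Python) =====
-- def recalculate_word_level(doc, wordlist):
--     word_count = {}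
--     for word in doc.strip().split(' '):
--         word_count[word] = word_count.get(word, 0) + 1
--     level = [0] * 7
--     for word, c in word_count.items():
--         level[wordlist.get(word, 7) - 1] += c
--     return level, word_count
-- ===== Notes on version B (the rewrite author's own statement) =====
-- stated objective: alternative
-- what changed: A does one pass over the document updating both the level histogram and the word counter per occurrence; B first builds the frequency table in one counting pass and then derives the level histogram from the counts of the unique words, adding each word's whole count to its level bucket at once.
import Mathlib
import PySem

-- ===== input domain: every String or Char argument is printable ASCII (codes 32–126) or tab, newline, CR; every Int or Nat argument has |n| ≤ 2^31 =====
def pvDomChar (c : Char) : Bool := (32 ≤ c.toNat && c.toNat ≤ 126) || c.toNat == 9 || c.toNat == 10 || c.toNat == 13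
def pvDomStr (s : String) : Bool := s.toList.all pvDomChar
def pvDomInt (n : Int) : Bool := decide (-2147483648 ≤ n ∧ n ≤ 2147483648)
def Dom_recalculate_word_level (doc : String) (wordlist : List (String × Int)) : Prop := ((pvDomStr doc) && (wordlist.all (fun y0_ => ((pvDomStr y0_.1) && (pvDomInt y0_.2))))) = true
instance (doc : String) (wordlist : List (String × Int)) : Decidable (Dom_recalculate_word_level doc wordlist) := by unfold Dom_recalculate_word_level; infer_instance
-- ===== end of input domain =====

-- B replaces A's single per-occurrence pass (histogram + counter together) by a count-first
-- two-phase structure: build the word-frequency table, then add each unique word's whole count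
-- to its level bucket; objective: alternative (same cost, different decomposition).


-- ===== PORT A =====
-- doc.strip().split(' ')  (split? is none only for an empty separator, so .getD [] is exact)
def pvSplitWords (doc : String) : List String :=
  (PySem.Str.split? (PySem.Str.strip doc) " ").getD []

-- `level[i] += c` with Python's index semantics; an out-of-range i is an IndexError in Python
-- (excluded by Pre_ below) and is left as a no-op here.
def pvAddAt (l : List Int) (i c : Int) : List Int :=
  match PySem.List.pyIdx? l.length i with
  | some j => l.set j (l.getD j 0 + c)
  | none => l

def recalculate_word_level (doc : String) (wordlist : List (String × Int)) : List Int × (List (String × Int)) :=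
  let wd : PySem.Dict String Int := PySem.Dict.mk wordlist
  let r := (pvSplitWords doc).foldl
    (fun (s : List Int × PySem.Dict String Int) word =>
      (if wd.contains word then pvAddAt s.1 (wd.getD word 0 - 1) 1 else pvAddAt s.1 6 1,
       if s.2.contains word then s.2.modify word 0 (fun v => v + 1) else s.2.insert word 1))
    ([0, 0, 0, 0, 0, 0, 0], PySem.Dict.empty)
  (r.1, r.2.items)

-- ===== PORT B =====
def recalculate_word_level_alt (doc : String) (wordlist : List (String × Int)) : List Int × (List (String × Int)) :=
  let wd : PySem.Dict String Int := PySem.Dict.mk wordlist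
  let word_count := (pvSplitWords doc).foldl
    (fun (d : PySem.Dict String Int) w => d.insert w (d.getD w 0 + 1)) PySem.Dict.empty
  let level := word_count.items.foldl
    (fun l (p : String × Int) => pvAddAt l (wd.getD p.1 7 - 1) p.2) [0, 0, 0, 0, 0, 0, 0]
  (level, word_count.items)

-- ===== PRECONDITION & SPEC =====
-- Excludes exactly the inputs on which the Python A raises IndexError: a word of the document
-- whose wordlist level v puts v-1 outside Python's valid index range [-7,6] for the 7-slot list
-- (B raises there as well).
def Pre_recalculate_word_level (doc : String) (wordlist : List (String × Int)) : Prop :=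
  ((pvSplitWords doc).all (fun w =>
    match (PySem.Dict.mk wordlist : PySem.Dict String Int).get? w with
    | some v => decide (-6 ≤ v ∧ v ≤ 7)
    | none => true)) = true

instance (doc : String) (wordlist : List (String × Int)) : Decidable (Pre_recalculate_word_level doc wordlist) := by
  unfold Pre_recalculate_word_level; infer_instance

def pvWitness_recalculate_word_level : String × (List (String × Int)) :=
  ("a b a", [("a", 3), ("c", 2)])

def Spec_recalculate_word_level (doc : String) (wordlist : List (String × Int)) (out : List Int × (List (String × Int))) : Prop := out = recalculate_word_level_alt doc wordlist
instance (doc : String) (wordlist : List (String × Int)) (out : List Int × (List (String × Int))) : Decidable (Spec_recalculate_word_level doc wordlist out) := by unfold Spec_recalculate_word_level; infer_instance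

-- ===== CLAIM (what is proved, stated in full; the proofs are below) =====
def Claim_equal_recalculate_word_level : Prop := ∀ (doc : String) (wordlist : List (String × Int)), Dom_recalculate_word_level doc wordlist → Pre_recalculate_word_level doc wordlist → Spec_recalculate_word_level doc wordlist (recalculate_word_level doc wordlist)

-- ===== LEMMAS AND PROOFS =====

theorem pvIdx_lt {n : Nat} {i : Int} {j : Nat} (h : PySem.List.pyIdx? n i = some j) : j < n := by
  unfold PySem.List.pyIdx? at h
  split_ifs at h <;> simp_all <;> omega

theorem length_pvAddAt (l : List Int) (i c : Int) : (pvAddAt l i c).length = l.length := by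
  unfold pvAddAt
  cases h : PySem.List.pyIdx? l.length i <;> simp

theorem getD_pvAddAt (l : List Int) (i c : Int) (j : Nat) :
    (pvAddAt l i c).getD j 0 =
      l.getD j 0 + (if PySem.List.pyIdx? l.length i = some j then c else 0) := by
  unfold pvAddAt
  cases h : PySem.List.pyIdx? l.length i with
  | none => simp
  | some k =>
    have hk : k < l.length := pvIdx_lt h
    simp only [List.getD_eq_getElem?_getD, List.getElem?_set]
    by_cases hkj : k = j
    · subst hkj
      simp [hk]
    · simp [hkj]

theorem length_fold_pvAddAt {α : Type} (xs : List α) (iw cw : α → Int) (l : List Int) :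
    (xs.foldl (fun l x => pvAddAt l (iw x) (cw x)) l).length = l.length := by
  induction xs generalizing l with
  | nil => rfl
  | cons a t ih => simp [List.foldl_cons, ih, length_pvAddAt]

theorem getD_fold_pvAddAt {α : Type} (xs : List α) (iw cw : α → Int) (l : List Int) (j : Nat) :
    (xs.foldl (fun l x => pvAddAt l (iw x) (cw x)) l).getD j 0 =
      l.getD j 0 + (xs.map (fun x => if PySem.List.pyIdx? l.length (iw x) = some j then cw x else 0)).sum := by
  induction xs generalizing l with
  | nil => simp
  | cons a t ih =>
    rw [List.foldl_cons, ih, getD_pvAddAt]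
    rw [length_pvAddAt]
    simp [List.map_cons]
    ring

theorem sum_map_ite_single {α : Type} [DecidableEq α] (ks : List α) (w : α) (f : α → Int)
    (hnd : ks.Nodup) :
    (ks.map (fun k => if w = k then f k else 0)).sum = if w ∈ ks then f w else 0 := by
  induction ks with
  | nil => simp
  | cons k t ih =>
    rcases List.nodup_cons.mp hnd with ⟨hkt, hnt⟩
    by_cases hwk : w = k
    · subst hwk
      simp only [List.map_cons, List.sum_cons, ih hnt]
      simp [hkt]
    · simp only [List.map_cons, List.sum_cons, if_neg hwk, ih hnt, List.mem_cons]
      simp [Ne.symm, hwk]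

theorem sum_map_group {α : Type} [DecidableEq α] (ws : List α) (ks : List α) (f : α → Int)
    (hnd : ks.Nodup) (hsub : ∀ w ∈ ws, w ∈ ks) :
    (ws.map f).sum = (ks.map (fun k => (ws.count k : Int) * f k)).sum := by
  induction ws with
  | nil => simp
  | cons w t ih =>
    have hsubt : ∀ x ∈ t, x ∈ ks := fun x hx => hsub x (List.mem_cons_of_mem _ hx)
    have hw : w ∈ ks := hsub w (List.mem_cons_self)
    have hstep : ∀ k : α, ((w :: t).count k : Int) * f k
        = (t.count k : Int) * f k + (if w = k then f k else 0) := by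
      intro k
      rw [List.count_cons]
      push_cast
      by_cases hwk : w = k <;> simp [hwk] <;> ring
    calc (List.map f (w :: t)).sum
        = f w + (List.map f t).sum := by simp
      _ = f w + (ks.map (fun k => (t.count k : Int) * f k)).sum := by rw [ih hsubt]
      _ = (ks.map (fun k => (t.count k : Int) * f k)).sum
            + (ks.map (fun k => if w = k then f k else 0)).sum := by
            rw [sum_map_ite_single ks w f hnd]
            simp [hw]; ring
      _ = (ks.map (fun k => ((w :: t).count k : Int) * f k)).sum := by
            rw [← PySem.List.sum_map_add_int]
            exact congrArg List.sum (List.map_congr_left (fun k _ => (hstep k).symm))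

theorem level_group (iw : String → Int) (words : List String) :
    words.foldl (fun l w => pvAddAt l (iw w) 1) [0, 0, 0, 0, 0, 0, 0] =
      ((PySem.Set.ofList words).map (fun k => (k, (words.count k : Int)))).foldl
        (fun l (p : String × Int) => pvAddAt l (iw p.1) p.2) [0, 0, 0, 0, 0, 0, 0] := by
  apply List.ext_getElem
  · rw [length_fold_pvAddAt words iw (fun _ => 1) [0, 0, 0, 0, 0, 0, 0],
        length_fold_pvAddAt ((PySem.Set.ofList words).map (fun k => (k, (words.count k : Int))))
          (fun p => iw p.1) (fun p => p.2) [0, 0, 0, 0, 0, 0, 0]]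
  · intro j h1 h2
    have hA := getD_fold_pvAddAt words iw (fun _ => 1) [0, 0, 0, 0, 0, 0, 0] j
    have hB := getD_fold_pvAddAt ((PySem.Set.ofList words).map (fun k => (k, (words.count k : Int))))
        (fun p => iw p.1) (fun p => p.2) [0, 0, 0, 0, 0, 0, 0] j
    rw [← List.getD_eq_getElem _ 0 h1, ← List.getD_eq_getElem _ 0 h2, hA, hB]
    congr 1
    rw [List.map_map]
    rw [sum_map_group words (PySem.Set.ofList words)
          (fun w => if PySem.List.pyIdx? ([0, 0, 0, 0, 0, 0, 0] : List Int).length (iw w) = some j then 1 else 0)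
          (PySem.Set.nodup_ofList words)
          (fun w hw => (PySem.Set.mem_ofList words w).mpr hw)]
    refine congrArg List.sum (List.map_congr_left (fun k _ => ?_))
    by_cases h : PySem.List.pyIdx? ([0, 0, 0, 0, 0, 0, 0] : List Int).length (iw k) = some j <;>
      simp [h]

theorem contains_of_get?_eq_some {κ ν : Type} [BEq κ] [LawfulBEq κ]
    (d : PySem.Dict κ ν) (k : κ) (v : ν) (h : d.get? k = some v) : d.contains k = true := by
  by_contra hc
  have : d.get? k = none := (PySem.Dict.get?_eq_none_iff_contains d k).mpr (by
    cases hcc : d.contains k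
    · rfl
    · exact absurd hcc hc)
  simp [this] at h

theorem stepA_level_eq (wd : PySem.Dict String Int) (l : List Int) (w : String) :
    (if wd.contains w then pvAddAt l (wd.getD w 0 - 1) 1 else pvAddAt l 6 1) =
      pvAddAt l (wd.getD w 7 - 1) 1 := by
  cases h : wd.get? w with
  | none =>
    have hc : wd.contains w = false := (PySem.Dict.get?_eq_none_iff_contains wd w).mp h
    simp [hc, PySem.Dict.getD, h]
  | some v =>
    have hc : wd.contains w = true := contains_of_get?_eq_some wd w v h
    simp [hc, PySem.Dict.getD, h]

theorem stepA_count_eq (d : PySem.Dict String Int) (w : String) :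
    (if d.contains w then d.modify w 0 (fun v => v + 1) else d.insert w 1) =
      d.insert w (d.getD w 0 + 1) := by
  cases hc : d.contains w with
  | true => simp [PySem.Dict.modify]
  | false =>
    have h : d.get? w = none := (PySem.Dict.get?_eq_none_iff_contains d w).mpr hc
    simp [PySem.Dict.getD, h]

theorem count_fold_eq_counter (words : List String) :
    words.foldl (fun (d : PySem.Dict String Int) w => d.insert w (d.getD w 0 + 1)) PySem.Dict.empty
      = PySem.Dict.counter words := by
  rw [PySem.Dict.counter_eq_foldl]
  rfl

-- ===== VERDICT (by name: the statement is the Claim_ definition above) =====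
theorem recalculate_word_level_spec : Claim_equal_recalculate_word_level := by
  unfold Claim_equal_recalculate_word_level
  intro doc wordlist _ _
  unfold Spec_recalculate_word_level
  unfold recalculate_word_level recalculate_word_level_alt
  simp only
  rw [PySem.List.foldl_prod_mk
      (f := fun l word => if (PySem.Dict.mk wordlist : PySem.Dict String Int).contains word then
              pvAddAt l ((PySem.Dict.mk wordlist : PySem.Dict String Int).getD word 0 - 1) 1
            else pvAddAt l 6 1)
      (g := fun (d : PySem.Dict String Int) word =>
            if d.contains word then d.modify word 0 (fun v => v + 1) else d.insert word 1)]
  simp only [stepA_level_eq, stepA_count_eq]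
  rw [count_fold_eq_counter]
  refine Prod.ext ?_ rfl
  simp only [PySem.Dict.items_counter]
  exact level_group (fun w => (PySem.Dict.mk wordlist : PySem.Dict String Int).getD w 7 - 1)
    (pvSplitWords doc)
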